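-- pv_equiv track=rewrite | github.com/allanRoberto/revesbot-final | apps/signals/patterns/final1.py | _family_color
-- ===== SOURCE A (Python) =====
-- from typing import Dict, List, Optional, Set, Tuple, Iterable, Any
--
-- RED: Set[int] = {
--     1,3,5,7,9,12,14,16,18,19,21,23,25,27,30,32,34,36
-- }
--
-- def color(n: int) -> Optional[str]:
--     if n == 0:
--         return None
--     return "R" if n in RED else "B"
--
-- def _family_color(n: int) -> Set[int]:
--     c = color(n)
--     if c is None:
--         return set()
--     if c == "R":
--         return set(RED)
--     else:
--         return {k for k in range(1, 37) if k not in RED}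
-- ===== SOURCE B (Python) =====
-- RED = {1,3,5,7,9,12,14,16,18,19,21,23,25,27,30,32,34,36}
--
-- def color(n: int):
--     if n == 0:
--         return None
--     return "R" if n in RED else "B"
--
-- def _family_color(n: int):
--     families = {}
--     for k in range(1, 37):
--         families.setdefault(color(k), set()).add(k)
--     return families.get(color(n), set())
-- ===== Notes on version B (the rewrite author's own statement) =====
-- stated objective: alternative
-- what changed: Replaces A's asymmetric branch (return the precomputed RED set vs build the black complement) by one grouping pass that buckets 1..36 into a color->set dictionary and then looks up color(n), which also yields the empty set for 0.
import Mathlib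
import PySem

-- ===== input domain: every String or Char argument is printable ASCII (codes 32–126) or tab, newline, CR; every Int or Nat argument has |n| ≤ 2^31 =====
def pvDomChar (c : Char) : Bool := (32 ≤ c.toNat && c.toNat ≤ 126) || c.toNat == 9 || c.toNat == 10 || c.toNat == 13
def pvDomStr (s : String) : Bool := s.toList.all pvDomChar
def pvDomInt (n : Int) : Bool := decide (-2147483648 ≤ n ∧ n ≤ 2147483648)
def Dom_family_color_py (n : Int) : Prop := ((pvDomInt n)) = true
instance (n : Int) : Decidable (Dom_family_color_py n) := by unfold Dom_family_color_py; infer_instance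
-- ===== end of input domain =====

set_option maxRecDepth 10000


-- B replaces A's asymmetric branch (precomputed RED set vs complement construction) by one
-- grouping pass bucketing 1..36 into a color -> set dictionary, then a lookup; objective: alternative.

-- ===== PORT A =====
-- the module-level RED set, in Python's literal order
def pvRED : List Int := [1,3,5,7,9,12,14,16,18,19,21,23,25,27,30,32,34,36]

def pvColor (n : Int) : Option String :=
  if n = 0 then none
  else if pvRED.contains n then some "R" else some "B"

def family_color_py (n : Int) : List Int :=
  match pvColor n with
  | none => []
  | some c =>
    if c = "R" then pvRED
    else (PySem.List.pyRange 1 37 1).filter (fun k => !(pvRED.contains k))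

-- ===== PORT B =====
-- families.setdefault(color(k), set()).add(k), then families.get(color(n), set())
def family_color_py_alt (n : Int) : List Int :=
  let fam : PySem.Dict (Option String) (List Int) :=
    (PySem.List.pyRange 1 37 1).foldl
      (fun d k => PySem.Dict.insert d (pvColor k) (PySem.Set.add (PySem.Dict.getD d (pvColor k) []) k))
      PySem.Dict.empty
  PySem.Dict.getD fam (pvColor n) []

-- ===== PRECONDITION & SPEC =====
def Spec_family_color_py (n : Int) (out : List Int) : Prop := out = family_color_py_alt n
instance (n : Int) (out : List Int) : Decidable (Spec_family_color_py n out) := by unfold Spec_family_color_py; infer_instance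

-- ===== CLAIM =====
def Claim_equal_family_color_py : Prop := ∀ (n : Int), Dom_family_color_py n → Spec_family_color_py n (family_color_py n)

-- ===== LEMMAS AND PROOFS =====

-- ===== VERDICT =====
theorem family_color_py_spec : Claim_equal_family_color_py := by
  intro n _
  unfold Spec_family_color_py family_color_py family_color_py_alt pvColor
  by_cases h0 : n = 0
  · simp [h0]; decide
  · by_cases hr : n ∈ pvRED
    · simp [h0, hr]; decide
    · simp [h0, hr]; decide
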